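-- pv_equiv track=rewrite | github.com/ata-turhan/Leetcode-Solutions | 1645-find-a-value-of-a-mysterious-function-closest-to-target/find-a-value-of-a-mysterious-function-closest-to-target.py | closestToTarget
-- ===== SOURCE A (Python) =====
-- from typing import List, Dict
-- from collections import Counter
--
-- def closestToTarget(arr: List[int], target: int) -> int:
--     """
--     Finds the subarray with the bitwise AND value closest to the target.
--
--     :param arr: List[int] - The input list of integers.
--     :param target: int - The target integer.
--     :return: int - The minimum difference between any subarray's bitwise AND value and the target.
--     """
--     def getSetBitsPositions(x: int) -> List[int]:
--         """
--         Returns the positions of set bits in the binary representation of x.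
--
--         :param x: int - The input integer.
--         :return: List[int] - List of positions of set bits.
--         """
--         return [i for i, bit in enumerate(reversed(bin(x)[2:])) if bit == '1']
--
--     def calculateBitwiseAND(window_length: int, bit_counts: Dict[int, int]) -> int:
--         """
--         Computes the bitwise AND value from the bit counts.
--
--         :param window_length: int - The length of the current window.
--         :param bit_counts: Dict[int, int] - The counts of set bits.
--         :return: int - The computed bitwise AND value.
--         """
--         return sum((1 << bit_position) for bit_position, count in bit_counts.items() if count == window_length)
--
--     current_and_value = arr[0]  # Initialize current AND value with the first number
--     minimum_difference = abs(current_and_value - target)  # Initialize the minimum difference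
--
--     window_bit_counts = Counter(getSetBitsPositions(arr[0]))  # Initialize the bit counts for the first number
--
--     left_pointer = right_pointer = 0  # Initialize left and right pointers
--
--     # Iterate through the array using a sliding window approach
--     while right_pointer < len(arr):
--         if current_and_value > target or left_pointer > right_pointer:
--             # Expand the window to the right
--             right_pointer += 1
--             if right_pointer >= len(arr):
--                 break
--             window_bit_counts += Counter(getSetBitsPositions(arr[right_pointer]))
--         else:
--             # Shrink the window from the left
--             window_bit_counts -= Counter(getSetBitsPositions(arr[left_pointer]))
--             left_pointer += 1
--
--         current_and_value = calculateBitwiseAND(right_pointer - left_pointer + 1, window_bit_counts)  # Compute the current AND value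
--
--         if left_pointer <= right_pointer:
--             minimum_difference = min(minimum_difference, abs(current_and_value - target))  # Update the minimum difference
--
--     return minimum_difference  # Return the minimum difference
-- ===== SOURCE B (Python) =====
-- from typing import List
--
--
-- def closestToTarget(arr: List[int], target: int) -> int:
--     """
--     Minimum |AND(subarray) - target| over all nonempty subarrays, by the same
--     two-pointer window but recomputing the window's AND directly instead of
--     maintaining a Counter of set-bit positions.
--     """
--     n = len(arr)
--     best = abs(arr[0] - target)
--     cur = arr[0]
--     left = right = 0
--     while right < n:
--         if cur > target or left > right:
--             right += 1
--             if right >= n: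
--                 break
--         else:
--             left += 1
--         if left <= right:
--             cur = arr[left]
--             for k in range(left + 1, right + 1):
--                 cur &= arr[k]
--             best = min(best, abs(cur - target))
--     return best
-- ===== Notes on version B (the rewrite author's own statement) =====
-- stated objective: simpler
-- what changed: B keeps the two-pointer window search but deletes the Counter-of-set-bit-positions data structure and both helper functions (bin()-string bit extraction and the count==window_length summation), recomputing the window's AND directly with a single fold over the window; the incremental per-bit bookkeeping disappears entirely.
-- outside the precondition, e.g. on closestToTarget([11, -4, 11], -5): A returns 5, B returns 13; on closestToTarget([], 0): A raises IndexError, B raises IndexError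
import Mathlib
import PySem

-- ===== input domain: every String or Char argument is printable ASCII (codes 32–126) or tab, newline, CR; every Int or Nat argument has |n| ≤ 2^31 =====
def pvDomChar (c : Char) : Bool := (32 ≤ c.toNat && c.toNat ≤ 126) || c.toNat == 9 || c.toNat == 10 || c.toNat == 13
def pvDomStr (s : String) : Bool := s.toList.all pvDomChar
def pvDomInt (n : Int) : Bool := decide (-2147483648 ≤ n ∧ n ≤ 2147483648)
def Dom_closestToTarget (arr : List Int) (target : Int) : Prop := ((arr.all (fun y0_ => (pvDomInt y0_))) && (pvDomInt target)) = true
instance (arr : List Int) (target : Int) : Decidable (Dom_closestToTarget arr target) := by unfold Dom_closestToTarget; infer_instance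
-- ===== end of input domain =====

-- B keeps A's two-pointer window but drops the Counter-of-set-bit-positions bookkeeping and
-- both helper functions, recomputing the window's AND directly; same return value on Pre_.

-- ===== PORT A =====
-- getSetBitsPositions: [i for i, bit in enumerate(reversed(bin(x)[2:])) if bit == '1']
-- (bin(x)[2:] is ported as dropping 2 chars of bin(x)'s character list — exact, also for x < 0)
def gsbp (x : Int) : List Int :=
  ((PySem.List.enumerate (((PySem.Int.toBinChars0b x).drop 2).reverse)).filter
      (fun p => p.2 == '1')).map (fun p => p.1)

-- Counter._keep_positive (del of non-positive entries, order kept)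
def keepPositive (d : PySem.Dict Int Int) : PySem.Dict Int Int :=
  PySem.Dict.mk (d.items.filter (fun p => decide (0 < p.2)))

-- Counter.__iadd__: for elem, count in other.items(): self[elem] = self[elem] + count; keep positive
def counterIAdd (d e : PySem.Dict Int Int) : PySem.Dict Int Int :=
  keepPositive (e.items.foldl (fun a kv => a.insert kv.1 (a.getD kv.1 0 + kv.2)) d)

-- Counter.__isub__: for elem, count in other.items(): self[elem] = self[elem] - count; keep positive
def counterISub (d e : PySem.Dict Int Int) : PySem.Dict Int Int :=
  keepPositive (e.items.foldl (fun a kv => a.insert kv.1 (a.getD kv.1 0 - kv.2)) d)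

-- calculateBitwiseAND: sum(1 << pos for pos, count in bit_counts.items() if count == window_length)
-- (1 << pos is ported with pos.toNat: every key produced by gsbp is ≥ 0)
def calcAND (wl : Int) (bc : PySem.Dict Int Int) : Int :=
  bc.items.foldl (fun s p => if p.2 == wl then s + ((1 : Int) <<< p.1.toNat) else s) 0

-- the while-loop; fuel 2*len(arr)+2 dominates the loop's ≤ 2*len(arr)+1 iterations
def loopA (arr : List Int) (target : Int) (fuel : Nat) (l r : Int)
    (bc : PySem.Dict Int Int) (cur best : Int) : Int :=
  match fuel with
  | 0 => best
  | fuel + 1 =>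
    if r < (arr.length : Int) then
      if cur > target ∨ l > r then
        if r + 1 ≥ (arr.length : Int) then best
        else
          let r' := r + 1
          let bc' := counterIAdd bc (PySem.Dict.counter (gsbp (PySem.List.pyGetD arr r' 0)))
          let cur' := calcAND (r' - l + 1) bc'
          let best' := if l ≤ r' then min best |cur' - target| else best
          loopA arr target fuel l r' bc' cur' best'
      else
        let l' := l + 1
        let bc' := counterISub bc (PySem.Dict.counter (gsbp (PySem.List.pyGetD arr l 0)))
        let cur' := calcAND (r - l' + 1) bc'
        let best' := if l' ≤ r then min best |cur' - target| else best
        loopA arr target fuel l' r bc' cur' best'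
    else best

def closestToTarget (arr : List Int) (target : Int) : Int :=
  let cur := PySem.List.pyGetD arr 0 0      -- arr[0] (IndexError on [] is outside Pre_)
  let best := |cur - target|
  let bc := PySem.Dict.counter (gsbp (PySem.List.pyGetD arr 0 0))
  loopA arr target (2 * arr.length + 2) 0 0 bc cur best

-- ===== PORT B =====
def loopB (arr : List Int) (target : Int) (fuel : Nat) (l r cur best : Int) : Int :=
  match fuel with
  | 0 => best
  | fuel + 1 =>
    if r < (arr.length : Int) then
      if cur > target ∨ l > r then
        if r + 1 ≥ (arr.length : Int) then best
        else
          if l ≤ r + 1 then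
            let cur' := (PySem.List.pyRange (l + 1) (r + 2) 1).foldl
              (fun c k => PySem.Int.band c (PySem.List.pyGetD arr k 0)) (PySem.List.pyGetD arr l 0)
            loopB arr target fuel l (r + 1) cur' (min best |cur' - target|)
          else loopB arr target fuel l (r + 1) cur best
      else
        if l + 1 ≤ r then
          let cur' := (PySem.List.pyRange (l + 2) (r + 1) 1).foldl
            (fun c k => PySem.Int.band c (PySem.List.pyGetD arr k 0)) (PySem.List.pyGetD arr (l + 1) 0)
          loopB arr target fuel (l + 1) r cur' (min best |cur' - target|)
        else loopB arr target fuel (l + 1) r cur best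
    else best

def closestToTarget_alt (arr : List Int) (target : Int) : Int :=
  let cur := PySem.List.pyGetD arr 0 0      -- arr[0] (IndexError on [] is outside Pre_)
  let best := |cur - target|
  loopB arr target (2 * arr.length + 2) 0 0 cur best

-- ===== PRECONDITION & SPEC =====
-- Pre_ is the problem's natural domain (LeetCode 1645: a nonempty array of positive integers, here
-- relaxed to nonnegative): A raises IndexError on [] (B raises too), and on arrays containing a
-- negative entry A's bin()-based bit extraction reads the characters of '-0b…' and returns an
-- accidental value that matches no subarray AND, so such arrays are excluded.
def Pre_closestToTarget (arr : List Int) (target : Int) : Prop :=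
  arr ≠ [] ∧ ∀ x ∈ arr, 0 ≤ x
instance (arr : List Int) (target : Int) : Decidable (Pre_closestToTarget arr target) := by
  unfold Pre_closestToTarget; infer_instance

def pvWitness_closestToTarget : List Int × Int := ([9, 12, 3, 7, 15], 5)

def Spec_closestToTarget (arr : List Int) (target : Int) (out : Int) : Prop :=
  out = closestToTarget_alt arr target
instance (arr : List Int) (target : Int) (out : Int) : Decidable (Spec_closestToTarget arr target out) := by
  unfold Spec_closestToTarget; infer_instance

-- ===== CLAIM (what is proved, stated in full; the proofs are below) =====
def Claim_equal_closestToTarget : Prop := ∀ (arr : List Int) (target : Int),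
  Dom_closestToTarget arr target → Pre_closestToTarget arr target →
  Spec_closestToTarget arr target (closestToTarget arr target)

-- ===== LEMMAS AND PROOFS =====
-- ---------- Part 1: bin(x) digit characterisation ----------

theorem toDigitsCore_eq (fuel : Nat) : ∀ (n : Nat) (ds : List Char), 0 < n → n ≤ fuel →
    Nat.toDigitsCore 2 fuel n ds = ((Nat.digits 2 n).map Nat.digitChar).reverse ++ ds := by
  induction fuel with
  | zero => intro n ds h1 h2; omega
  | succ fuel ih =>
    intro n ds h1 h2
    rw [Nat.digits_def' (by norm_num) h1]
    by_cases h : n / 2 = 0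
    · simp [Nat.toDigitsCore, h, Nat.digits_zero]
    · have hrec := ih (n / 2) ((n % 2).digitChar :: ds) (Nat.pos_of_ne_zero h) (by omega)
      simp only [Nat.toDigitsCore, h, if_false]
      rw [hrec]
      simp

theorem toDigits_two_eq (n : Nat) (h : 0 < n) :
    Nat.toDigits 2 n = ((Nat.digits 2 n).map Nat.digitChar).reverse := by
  unfold Nat.toDigits
  rw [toDigitsCore_eq (n + 1) n [] h (by omega)]
  simp

theorem digits_map_getElem?_testBit (n : Nat) : ∀ (k : Nat),
    (((Nat.digits 2 n).map Nat.digitChar)[k]? = some '1') ↔ n.testBit k := by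
  induction n using Nat.strong_induction_on with
  | _ n ih =>
    intro k
    rcases Nat.eq_zero_or_pos n with h0 | hpos
    · subst h0; simp
    · rw [Nat.digits_def' (by norm_num) hpos]
      cases k with
      | zero =>
        simp only [List.map_cons, List.getElem?_cons_zero, Nat.testBit_zero]
        have h2 : n % 2 = 0 ∨ n % 2 = 1 := by omega
        rcases h2 with h2 | h2 <;> simp [h2, Nat.digitChar]
      | succ k =>
        simp only [List.map_cons, List.getElem?_cons_succ, Nat.testBit_add_one]
        exact ih (n / 2) (by omega) k

theorem toDigits_rev_getElem? (n : Nat) (k : Nat) :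
    (((Nat.toDigits 2 n).reverse)[k]? = some '1') ↔ n.testBit k := by
  rcases Nat.eq_zero_or_pos n with h0 | hpos
  · subst h0
    have he : (Nat.toDigits 2 0).reverse = ['0'] := rfl
    rw [he]
    constructor
    · intro h
      cases k with
      | zero => simp at h
      | succ k => simp at h
    · intro h; simp [Nat.zero_testBit] at h
  · rw [toDigits_two_eq n hpos, List.reverse_reverse]
    exact digits_map_getElem?_testBit n k

theorem gsbp_mem (x : Int) (hx : 0 ≤ x) (i : Int) :
    i ∈ gsbp x ↔ ∃ k : Nat, i = (k : Int) ∧ x.toNat.testBit k := by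
  have hbin : ((PySem.Int.toBinChars0b x).drop 2) = Nat.toDigits 2 x.toNat := by
    simp [PySem.Int.toBinChars0b, not_lt.mpr hx]
  unfold gsbp
  rw [hbin]
  constructor
  · intro h
    rcases List.mem_map.mp h with ⟨p, hp, hpi⟩
    rcases List.mem_filter.mp hp with ⟨hpe, hp1⟩
    rcases (PySem.List.mem_enumerate_iff _ _ _).mp hpe with ⟨k, hk, hpk⟩
    refine ⟨k, ?_, ?_⟩
    · rw [← hpi, hpk]; simp
    · have : ((Nat.toDigits 2 x.toNat).reverse)[k] = '1' := by
        have := hp1; rw [hpk] at this; simpa using this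
      exact (toDigits_rev_getElem? x.toNat k).mp (by rw [List.getElem?_eq_some_iff]; exact ⟨hk, this⟩)
  · rintro ⟨k, rfl, htb⟩
    have hsome := (toDigits_rev_getElem? x.toNat k).mpr htb
    rcases List.getElem?_eq_some_iff.mp hsome with ⟨hk, hval⟩
    apply List.mem_map.mpr
    refine ⟨((k : Int), '1'), ?_, rfl⟩
    apply List.mem_filter.mpr
    constructor
    · rw [(PySem.List.mem_enumerate_iff _ _ _)]
      exact ⟨k, hk, by simp [hval]⟩
    · simp

theorem gsbp_nodup (x : Int) : (gsbp x).Nodup := by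
  unfold gsbp
  have h1 := PySem.List.pairwise_lt_enumerate (((PySem.Int.toBinChars0b x).drop 2).reverse) 0
  have h2 := h1.filter (fun p => p.2 == '1')
  have h3 : (((PySem.List.enumerate (((PySem.Int.toBinChars0b x).drop 2).reverse)).filter
      (fun p => p.2 == '1')).map (fun p => p.1)).Pairwise (· < ·) := by
    rw [List.pairwise_map]; exact h2
  exact h3.imp (fun h => ne_of_lt h)

-- ---------- Part 2: association-list / Dict lemmas ----------

def lk (ps : List (Int × Int)) (k : Int) : Int :=
  ((ps.find? (fun p => p.1 == k)).map Prod.snd).getD 0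

theorem getD_eq_lk (d : PySem.Dict Int Int) (k : Int) : d.getD k 0 = lk d.items k := rfl

theorem lk_nil (k : Int) : lk [] k = 0 := rfl

theorem lk_cons (p : Int × Int) (ps : List (Int × Int)) (k : Int) :
    lk (p :: ps) k = if p.1 = k then p.2 else lk ps k := by
  by_cases h : p.1 = k
  · simp [lk, List.find?_cons_of_pos, h]
  · simp [lk, List.find?_cons_of_neg, h]

theorem lk_eq_zero_of_not_mem (ps : List (Int × Int)) (k : Int)
    (h : k ∉ ps.map Prod.fst) : lk ps k = 0 := by
  induction ps with
  | nil => rfl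
  | cons p ps ih =>
    simp only [List.map_cons, List.mem_cons] at h
    push Not at h
    rw [lk_cons, if_neg (fun he => h.1 he.symm), ih h.2]

theorem mem_of_lk_ne_zero (ps : List (Int × Int)) (k : Int) (h : lk ps k ≠ 0) :
    (k, lk ps k) ∈ ps := by
  induction ps with
  | nil => exact absurd rfl h
  | cons p ps ih =>
    rw [lk_cons] at h ⊢
    by_cases hp : p.1 = k
    · rw [if_pos hp] at h ⊢
      rw [← hp]
      exact List.mem_cons_self ..
    · rw [if_neg hp] at h ⊢
      right; exact ih h

theorem lk_of_mem (ps : List (Int × Int)) (k v : Int)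
    (hnd : (ps.map Prod.fst).Nodup) (h : (k, v) ∈ ps) : lk ps k = v := by
  induction ps with
  | nil => simp at h
  | cons p ps ih =>
    simp only [List.map_cons, List.nodup_cons] at hnd
    rcases List.mem_cons.mp h with h1 | h1
    · rw [← h1, lk_cons, if_pos rfl]
    · rw [lk_cons]
      have hne : p.1 ≠ k := by
        intro he; exact hnd.1 (he ▸ (List.mem_map.mpr ⟨(k, v), h1, rfl⟩))
      rw [if_neg hne, ih hnd.2 h1]

-- getD of the Counter.__iadd__/__isub__ accumulation foldl
theorem foldl_insert_getD (op : Int → Int → Int) :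
    ∀ (ps : List (Int × Int)) (d : PySem.Dict Int Int) (k : Int),
    (ps.map Prod.fst).Nodup →
    (ps.foldl (fun a kv => a.insert kv.1 (op (a.getD kv.1 0) kv.2)) d).getD k 0 =
      if k ∈ ps.map Prod.fst then op (d.getD k 0) (lk ps k) else d.getD k 0 := by
  intro ps
  induction ps with
  | nil => intro d k _; simp
  | cons p ps ih =>
    intro d k hnd
    simp only [List.map_cons, List.nodup_cons] at hnd
    simp only [List.foldl_cons]
    rw [ih _ k hnd.2]
    by_cases hk : p.1 = k
    · subst hk
      have hkn : p.1 ∉ ps.map Prod.fst := hnd.1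
      rw [if_neg hkn, lk_cons, if_pos rfl, PySem.Dict.getD_insert_self]
      simp [List.mem_cons]
    · rw [lk_cons, if_neg hk, PySem.Dict.getD_insert_of_ne _ _ _ (fun he => hk he.symm)]
      simp only [List.map_cons, List.mem_cons]
      by_cases hm : k ∈ ps.map Prod.fst
      · rw [if_pos hm, if_pos (Or.inr hm)]
      · rw [if_neg hm, if_neg (by tauto)]

theorem foldl_insert_keys_nodup (op : Int → Int → Int) :
    ∀ (ps : List (Int × Int)) (d : PySem.Dict Int Int),
    d.keys.Nodup →
    (ps.foldl (fun a kv => a.insert kv.1 (op (a.getD kv.1 0) kv.2)) d).keys.Nodup := by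
  intro ps
  induction ps with
  | nil => intro d h; exact h
  | cons p ps ih =>
    intro d h
    exact ih _ (PySem.Dict.nodup_keys_insert _ _ _ h)

theorem lk_filter_pos : ∀ (ps : List (Int × Int)) (k : Int), (ps.map Prod.fst).Nodup →
    lk (ps.filter (fun p => decide (0 < p.2))) k = if 0 < lk ps k then lk ps k else 0 := by
  intro ps
  induction ps with
  | nil => intro k _; simp [lk_nil]
  | cons p ps ih =>
    intro k hnd
    simp only [List.map_cons, List.nodup_cons] at hnd
    by_cases hp : (0 : Int) < p.2
    · rw [List.filter_cons_of_pos (by simpa using hp), lk_cons, lk_cons]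
      by_cases hk : p.1 = k
      · simp [hk, hp]
      · rw [if_neg hk, if_neg hk]; exact ih k hnd.2
    · rw [List.filter_cons_of_neg (by simpa using hp), lk_cons]
      by_cases hk : p.1 = k
      · have hkn : k ∉ ps.map Prod.fst := hk ▸ hnd.1
        rw [if_pos hk, lk_eq_zero_of_not_mem _ _ (by
          intro hm
          exact hkn ((List.map_subset _ (List.filter_sublist.subset)) hm))]
        rw [if_neg (by omega)]
      · rw [if_neg hk]; exact ih k hnd.2

theorem keepPositive_getD (d : PySem.Dict Int Int) (k : Int) (hnd : d.keys.Nodup) :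
    (keepPositive d).getD k 0 = if 0 < d.getD k 0 then d.getD k 0 else 0 := by
  rw [getD_eq_lk, getD_eq_lk]
  exact lk_filter_pos d.items k hnd

theorem keepPositive_keys_nodup (d : PySem.Dict Int Int) (hnd : d.keys.Nodup) :
    (keepPositive d).keys.Nodup := by
  show ((d.items.filter (fun p => decide (0 < p.2))).map Prod.fst).Nodup
  exact ((List.filter_sublist).map Prod.fst).nodup hnd

theorem keepPositive_pos (d : PySem.Dict Int Int) :
    ∀ kv ∈ (keepPositive d).items, 0 < kv.2 := by
  intro kv hkv
  have := List.mem_filter.mp hkv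
  simpa using this.2

-- ---------- Part 3: the bit-count invariant ----------

-- number of elements of w whose bit k.toNat is set (meaningful for 0 ≤ k)
def cntBit (w : List Int) (k : Int) : Int :=
  (w.countP (fun x => x.toNat.testBit k.toNat) : Int)

def CntOK (w : List Int) (d : PySem.Dict Int Int) : Prop :=
  d.keys.Nodup ∧ (∀ kv ∈ d.items, 0 < kv.2) ∧
  (∀ k : Int, d.getD k 0 = if 0 ≤ k then cntBit w k else 0)

theorem cntBit_nonneg (w : List Int) (k : Int) : 0 ≤ cntBit w k := by
  unfold cntBit; positivity

theorem gsbp_count (x : Int) (hx : 0 ≤ x) (k : Int) :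
    ((gsbp x).count k : Int) = if 0 ≤ k ∧ x.toNat.testBit k.toNat then 1 else 0 := by
  by_cases h : k ∈ gsbp x
  · rw [List.count_eq_one_of_mem (gsbp_nodup x) h]
    rcases (gsbp_mem x hx k).mp h with ⟨k', rfl, htb⟩
    rw [if_pos ⟨Int.natCast_nonneg k', by simpa using htb⟩]
    simp
  · rw [List.count_eq_zero_of_not_mem h]
    rw [if_neg (by
      rintro ⟨hk0, htb⟩
      exact h ((gsbp_mem x hx k).mpr ⟨k.toNat, (Int.toNat_of_nonneg hk0).symm, htb⟩))]
    simp

theorem counter_gsbp_CntOK (x : Int) (hx : 0 ≤ x) :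
    CntOK [x] (PySem.Dict.counter (gsbp x)) := by
  refine ⟨PySem.Dict.nodup_keys_counter _, ?_, ?_⟩
  · intro kv hkv
    rw [PySem.Dict.items_counter] at hkv
    rcases List.mem_map.mp hkv with ⟨k, hk, rfl⟩
    have : k ∈ gsbp x := (PySem.Set.mem_ofList _ _).mp hk
    have := List.count_pos_iff.mpr this
    simpa using this
  · intro k
    rw [PySem.Dict.getD_counter, gsbp_count x hx k]
    unfold cntBit
    by_cases hk : 0 ≤ k
    · simp only [if_pos hk, List.countP, List.countP.go]
      by_cases ht : x.toNat.testBit k.toNat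
      · simp [ht, hk]
      · simp [ht, hk]
    · simp [hk]

theorem cntBit_append (w : List Int) (x : Int) (hx : 0 ≤ x) (k : Int) (hk : 0 ≤ k) :
    cntBit (w ++ [x]) k = cntBit w k + ((gsbp x).count k : Int) := by
  unfold cntBit
  rw [List.countP_append, gsbp_count x hx k]
  by_cases ht : x.toNat.testBit k.toNat
  · simp [ht, hk]
  · simp [ht, hk]

theorem cntBit_cons (w : List Int) (x : Int) (hx : 0 ≤ x) (k : Int) (hk : 0 ≤ k) :
    cntBit (x :: w) k = cntBit w k + ((gsbp x).count k : Int) := by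
  unfold cntBit
  rw [List.countP_cons, gsbp_count x hx k]
  by_cases ht : x.toNat.testBit k.toNat
  · simp [ht, hk]
  · simp [ht, hk]

-- lk of a counter's items is its getD
theorem lk_counter (xs : List Int) (k : Int) :
    lk (PySem.Dict.counter xs).items k = ((xs.count k : Nat) : Int) := by
  rw [← getD_eq_lk, PySem.Dict.getD_counter]

theorem CntOK_add (w : List Int) (d : PySem.Dict Int Int) (x : Int)
    (hx : 0 ≤ x) (h : CntOK w d) :
    CntOK (w ++ [x]) (counterIAdd d (PySem.Dict.counter (gsbp x))) := by
  obtain ⟨hnd, hpos, hgd⟩ := h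
  have hndc : ((PySem.Dict.counter (gsbp x)).items.map Prod.fst).Nodup :=
    PySem.Dict.nodup_keys_counter _
  have hfnd := foldl_insert_keys_nodup (· + ·) (PySem.Dict.counter (gsbp x)).items d hnd
  refine ⟨keepPositive_keys_nodup _ hfnd, keepPositive_pos _, ?_⟩
  intro k
  unfold counterIAdd
  rw [keepPositive_getD _ _ hfnd]
  rw [foldl_insert_getD (· + ·) _ d k hndc]
  by_cases hm : k ∈ (PySem.Dict.counter (gsbp x)).items.map Prod.fst
  · rw [if_pos hm, hgd k, lk_counter]
    by_cases hk : 0 ≤ k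
    · rw [if_pos hk, ← cntBit_append w x hx k hk]
      have := cntBit_nonneg (w ++ [x]) k
      by_cases h0 : (0 : Int) < cntBit (w ++ [x]) k
      · rw [if_pos h0, if_pos hk]
      · rw [if_neg h0, if_pos hk]; omega
    · -- negative key cannot be a key of the counter of gsbp
      exfalso
      have : k ∈ PySem.Set.ofList (gsbp x) := by
        have hkeys : (PySem.Dict.counter (gsbp x)).items.map Prod.fst =
            (PySem.Dict.counter (gsbp x)).keys := rfl
        rw [hkeys, PySem.Dict.keys_counter] at hm
        exact hm
      have := (PySem.Set.mem_ofList _ _).mp this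
      rcases (gsbp_mem x hx k).mp this with ⟨k', rfl, _⟩
      exact hk (Int.natCast_nonneg k')
  · rw [if_neg hm, hgd k]
    by_cases hk : 0 ≤ k
    · rw [if_pos hk]
      have hnm : k ∉ gsbp x := by
        intro hmem
        apply hm
        have hkeys : (PySem.Dict.counter (gsbp x)).items.map Prod.fst =
            (PySem.Dict.counter (gsbp x)).keys := rfl
        rw [hkeys, PySem.Dict.keys_counter]
        exact (PySem.Set.mem_ofList _ _).mpr hmem
      have hcnt : ((gsbp x).count k : Int) = 0 := by
        rw [List.count_eq_zero_of_not_mem hnm]; rfl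
      have := cntBit_append w x hx k hk
      rw [hcnt] at this
      rw [← (by omega : cntBit w k = cntBit (w ++ [x]) k)]
      have := cntBit_nonneg w k
      by_cases h0 : (0 : Int) < cntBit w k
      · rw [if_pos h0, if_pos hk]
      · rw [if_neg h0, if_pos hk]; omega
    · rw [if_neg hk]; simp [hk]

theorem CntOK_sub (w : List Int) (d : PySem.Dict Int Int) (x : Int)
    (hx : 0 ≤ x) (h : CntOK (x :: w) d) :
    CntOK w (counterISub d (PySem.Dict.counter (gsbp x))) := by
  obtain ⟨hnd, hpos, hgd⟩ := h
  have hndc : ((PySem.Dict.counter (gsbp x)).items.map Prod.fst).Nodup :=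
    PySem.Dict.nodup_keys_counter _
  have hfnd := foldl_insert_keys_nodup (· - ·) (PySem.Dict.counter (gsbp x)).items d hnd
  refine ⟨keepPositive_keys_nodup _ hfnd, keepPositive_pos _, ?_⟩
  intro k
  unfold counterISub
  rw [keepPositive_getD _ _ hfnd]
  rw [foldl_insert_getD (· - ·) _ d k hndc]
  by_cases hm : k ∈ (PySem.Dict.counter (gsbp x)).items.map Prod.fst
  · rw [if_pos hm, hgd k, lk_counter]
    by_cases hk : 0 ≤ k
    · rw [if_pos hk]
      have hrec := cntBit_cons w x hx k hk
      have heq : cntBit (x :: w) k - ((gsbp x).count k : Int) = cntBit w k := by omega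
      rw [heq]
      have := cntBit_nonneg w k
      by_cases h0 : (0 : Int) < cntBit w k
      · rw [if_pos h0, if_pos hk]
      · rw [if_neg h0, if_pos hk]; omega
    · exfalso
      have : k ∈ PySem.Set.ofList (gsbp x) := by
        have hkeys : (PySem.Dict.counter (gsbp x)).items.map Prod.fst =
            (PySem.Dict.counter (gsbp x)).keys := rfl
        rw [hkeys, PySem.Dict.keys_counter] at hm
        exact hm
      have := (PySem.Set.mem_ofList _ _).mp this
      rcases (gsbp_mem x hx k).mp this with ⟨k', rfl, _⟩
      exact hk (Int.natCast_nonneg k')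
  · rw [if_neg hm, hgd k]
    by_cases hk : 0 ≤ k
    · rw [if_pos hk]
      have hnm : k ∉ gsbp x := by
        intro hmem
        apply hm
        have hkeys : (PySem.Dict.counter (gsbp x)).items.map Prod.fst =
            (PySem.Dict.counter (gsbp x)).keys := rfl
        rw [hkeys, PySem.Dict.keys_counter]
        exact (PySem.Set.mem_ofList _ _).mpr hmem
      have hcnt : ((gsbp x).count k : Int) = 0 := by
        rw [List.count_eq_zero_of_not_mem hnm]; rfl
      have hrec := cntBit_cons w x hx k hk
      rw [hcnt] at hrec
      rw [(by omega : cntBit (x :: w) k = cntBit w k)]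
      have := cntBit_nonneg w k
      by_cases h0 : (0 : Int) < cntBit w k
      · rw [if_pos h0, if_pos hk]
      · rw [if_neg h0, if_pos hk]; omega
    · rw [if_neg hk]; simp [hk]

-- ---------- Part 4: calcAND computes the window's AND ----------

def wAND (w : List Int) : Int := w.tail.foldl PySem.Int.band (w.headD 0)

theorem foldl_land_testBit : ∀ (ws : List Nat) (a : Nat) (j : Nat),
    (ws.foldl (· &&& ·) a).testBit j = (a.testBit j && ws.all (fun x => x.testBit j)) := by
  intro ws
  induction ws with
  | nil => intro a j; simp
  | cons y ws ih =>
    intro a j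
    simp only [List.foldl_cons, List.all_cons]
    rw [ih, Nat.testBit_land, Bool.and_assoc]

theorem foldl_band_cast : ∀ (t : List Int) (a : Nat), (∀ y ∈ t, 0 ≤ y) →
    t.foldl PySem.Int.band (a : Int) = (((t.map Int.toNat).foldl (· &&& ·) a : Nat) : Int) := by
  intro t
  induction t with
  | nil => intro a _; simp
  | cons y t ih =>
    intro a hnn
    simp only [List.foldl_cons, List.map_cons]
    have hy : 0 ≤ y := hnn y (List.mem_cons_self ..)
    rw [PySem.Int.band_of_nonneg (Int.natCast_nonneg a) hy]
    exact ih (a &&& y.toNat) (fun z hz => hnn z (List.mem_cons_of_mem _ hz))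

theorem wAND_eq_cast (w : List Int) (hne : w ≠ []) (hnn : ∀ y ∈ w, 0 ≤ y) :
    wAND w = (((w.map Int.toNat).tail.foldl (· &&& ·) (w.headD 0).toNat : Nat) : Int) := by
  rcases w with - | ⟨h, t⟩
  · exact absurd rfl hne
  · unfold wAND
    simp only [List.tail_cons, List.headD_cons, List.map_cons]
    have h0 : 0 ≤ h := hnn h (List.mem_cons_self ..)
    rw [← Int.toNat_of_nonneg h0]
    exact foldl_band_cast t h.toNat (fun z hz => hnn z (List.mem_cons_of_mem _ hz))

-- the 0/1-valued sum: a foldl with an if is the sum over the filtered list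
theorem foldl_if_sum (wl : Int) : ∀ (ps : List (Int × Int)) (s : Int),
    ps.foldl (fun s p => if p.2 == wl then s + ((1 : Int) <<< p.1.toNat) else s) s =
      s + (((ps.filter (fun p => p.2 == wl)).map (fun p => (1 : Int) <<< p.1.toNat)).sum) := by
  intro ps
  induction ps with
  | nil => intro s; simp
  | cons p ps ih =>
    intro s
    simp only [List.foldl_cons]
    by_cases hp : p.2 = wl
    · rw [List.filter_cons_of_pos (by simpa using hp)]
      rw [if_pos (by simpa using hp), ih]
      simp [add_assoc]
    · rw [List.filter_cons_of_neg (by simpa using hp)]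
      rw [if_neg (by simpa using hp), ih]

theorem sum_pow_split : ∀ (T : List Nat),
    (T.map (fun k => (2 : Nat) ^ k)).sum =
      T.countP (fun k => k == 0) + 2 * (((T.filter (fun k => ¬ k == 0)).map (fun k => (2 : Nat) ^ (k - 1))).sum) := by
  intro T
  induction T with
  | nil => simp
  | cons t T ih =>
    by_cases ht : t = 0
    · subst ht
      simp only [List.map_cons, List.sum_cons, List.countP_cons]
      rw [List.filter_cons_of_neg (by simp)]
      simp [ih]; ring
    · simp only [List.map_cons, List.sum_cons, List.countP_cons]
      rw [List.filter_cons_of_pos (by simpa using ht)]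
      simp only [List.map_cons, List.sum_cons]
      rw [ih]
      have : (2 : Nat) ^ t = 2 * 2 ^ (t - 1) := by
        rw [← pow_succ']
        congr 1
        omega
      simp [ht, this]
      ring

theorem sum_two_pow_of_testBit : ∀ (v : Nat) (T : List Nat), T.Nodup →
    (∀ k, k ∈ T ↔ v.testBit k) → (T.map (fun k => (2 : Nat) ^ k)).sum = v := by
  intro v
  induction v using Nat.strong_induction_on with
  | _ v ih =>
    intro T hnd hmem
    rcases Nat.eq_zero_or_pos v with h0 | hpos
    · subst h0
      have : T = [] := by
        apply List.eq_nil_iff_forall_not_mem.mpr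
        intro k hk
        have := (hmem k).mp hk
        simp [Nat.zero_testBit] at this
      subst this; rfl
    · set T0 : List Nat := (T.filter (fun k => ¬ k == 0)).map (fun k => k - 1) with hT0
      have hnd0 : T0.Nodup := by
        apply List.Nodup.map_on
        · intro a ha b hb hab
          have ha' := List.of_mem_filter ha
          have hb' := List.of_mem_filter hb
          simp at ha' hb'
          omega
        · exact hnd.filter _
      have hmem0 : ∀ k, k ∈ T0 ↔ (v / 2).testBit k := by
        intro k
        constructor
        · intro hk
          rcases List.mem_map.mp hk with ⟨t, ht, rfl⟩
          have ht' := List.of_mem_filter ht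
          simp at ht'
          have htm := List.mem_of_mem_filter ht
          have := (hmem t).mp htm
          rcases Nat.exists_eq_add_of_lt (Nat.pos_of_ne_zero ht') with ⟨t', rfl⟩
          simp only [Nat.zero_add] at *
          rw [(by omega : t' + 1 - 1 = t')]
          rw [← Nat.testBit_add_one]
          simpa using this
        · intro hk
          apply List.mem_map.mpr
          refine ⟨k + 1, ?_, by omega⟩
          apply List.mem_filter.mpr
          refine ⟨(hmem (k + 1)).mpr (by rw [Nat.testBit_add_one]; exact hk), by simp⟩
      have hrec := ih (v / 2) (by omega) T0 hnd0 hmem0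
      have hsplit := sum_pow_split T
      have hcnt : T.countP (fun k => k == 0) = if v.testBit 0 then 1 else 0 := by
        have : T.countP (fun k => k == 0) = T.count 0 := by
          simp [List.count]
        rw [this]
        by_cases h0 : (0 : Nat) ∈ T
        · rw [List.count_eq_one_of_mem hnd h0, if_pos ((hmem 0).mp h0)]
        · rw [List.count_eq_zero_of_not_mem h0, if_neg (fun hb => h0 ((hmem 0).mpr hb))]
      have hT0sum : ((T.filter (fun k => ¬ k == 0)).map (fun k => (2:Nat) ^ (k - 1))).sum
          = (T0.map (fun k => (2 : Nat) ^ k)).sum := by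
        rw [hT0, List.map_map]
        rfl
      rw [hsplit, hcnt, hT0sum, hrec]
      have h2 : (if v.testBit 0 then 1 else 0 : Nat) = v % 2 := by
        rw [Nat.testBit_zero]
        rcases Nat.mod_two_eq_zero_or_one v with h | h <;> simp [h]
      rw [h2]
      omega

-- bridge: the Int-valued sum of 1 <<< k over S equals the Nat sum of 2^k
theorem sum_shift_cast (S : List Int) (hnn : ∀ i ∈ S, 0 ≤ i) :
    (S.map (fun i => (1 : Int) <<< i.toNat)).sum =
      (((S.map Int.toNat).map (fun k => (2 : Nat) ^ k)).sum : Nat) := by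
  induction S with
  | nil => simp
  | cons i S ih =>
    simp only [List.map_cons, List.sum_cons]
    rw [ih (fun z hz => hnn z (List.mem_cons_of_mem _ hz))]
    have : (1 : Int) <<< ((i.toNat : Int)) = (((2 : Nat) ^ i.toNat : Nat) : Int) := by
      rw [Int.shiftLeft_eq_mul_pow]
      push_cast
      ring
    rw [this]
    push_cast
    ring

theorem calc_eq (w : List Int) (d : PySem.Dict Int Int)
    (h : CntOK w d) (hne : w ≠ []) (hnn : ∀ y ∈ w, 0 ≤ y) :
    calcAND (w.length : Int) d = wAND w := by
  obtain ⟨hnd, hpos, hgd⟩ := h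
  unfold calcAND
  rw [foldl_if_sum, zero_add]
  set v : Nat := (w.map Int.toNat).tail.foldl (· &&& ·) (w.headD 0).toNat with hv
  set S : List Int := (d.items.filter (fun p => p.2 == (w.length : Int))).map Prod.fst with hS
  have hSshape : (d.items.filter (fun p => p.2 == (w.length : Int))).map
      (fun p => (1 : Int) <<< p.1.toNat) = S.map (fun i => (1 : Int) <<< i.toNat) := by
    rw [hS, List.map_map]; rfl
  -- membership characterisation of S
  have hvbit : ∀ k : Nat, v.testBit k = ((w.map Int.toNat).all (fun x => x.testBit k)) := by
    intro k
    rcases w with - | ⟨h0, t⟩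
    · exact absurd rfl hne
    · rw [hv]
      simp only [List.map_cons, List.tail_cons, List.headD_cons]
      rw [foldl_land_testBit]
      simp
  have hSmem : ∀ i : Int, i ∈ S ↔ 0 ≤ i ∧ v.testBit i.toNat := by
    intro i
    constructor
    · intro hi
      rcases List.mem_map.mp hi with ⟨p, hp, rfl⟩
      rcases List.mem_filter.mp hp with ⟨hpi, hpv⟩
      have hval : p.2 = (w.length : Int) := by simpa using hpv
      have hlk : lk d.items p.1 = p.2 := lk_of_mem d.items p.1 p.2 hnd hpi
      have hgdp := hgd p.1
      rw [getD_eq_lk, hlk] at hgdp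
      have hp1 : 0 ≤ p.1 := by
        by_contra hneg
        rw [if_neg hneg] at hgdp
        have := hpos p hpi
        omega
      refine ⟨hp1, ?_⟩
      rw [if_pos hp1] at hgdp
      rw [hvbit]
      rw [hval] at hgdp
      have hcnt : (w.countP (fun x => x.toNat.testBit p.1.toNat)) = w.length := by
        unfold cntBit at hgdp
        omega
      rw [List.all_eq_true]
      intro z hz
      rcases List.mem_map.mp hz with ⟨y, hy, rfl⟩
      exact (List.countP_eq_length.mp hcnt) y hy
    · rintro ⟨hi0, hbit⟩
      rw [hvbit] at hbit
      have hcnt : cntBit w i = (w.length : Int) := by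
        unfold cntBit
        congr 1
        apply List.countP_eq_length.mpr
        intro y hy
        exact (List.all_eq_true.mp hbit) y.toNat (List.mem_map.mpr ⟨y, hy, rfl⟩)
      have hgdi := hgd i
      rw [if_pos hi0, hcnt] at hgdi
      have hlkne : lk d.items i ≠ 0 := by
        rw [← getD_eq_lk, hgdi]
        have : w.length ≠ 0 := by simpa using hne
        simp
        omega
      have hmm := mem_of_lk_ne_zero d.items i hlkne
      rw [← getD_eq_lk, hgdi] at hmm
      apply List.mem_map.mpr
      refine ⟨(i, (w.length : Int)), List.mem_filter.mpr ⟨hmm, by simp⟩, rfl⟩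
  have hSnd : S.Nodup := by
    rw [hS]
    exact ((List.filter_sublist).map Prod.fst).nodup hnd
  have hTnd : (S.map Int.toNat).Nodup := by
    apply List.Nodup.map_on
    · intro a ha b hb hab
      have ha0 := ((hSmem a).mp ha).1
      have hb0 := ((hSmem b).mp hb).1
      omega
    · exact hSnd
  have hTmem : ∀ k : Nat, k ∈ S.map Int.toNat ↔ v.testBit k := by
    intro k
    constructor
    · intro hk
      rcases List.mem_map.mp hk with ⟨i, hi, rfl⟩
      exact ((hSmem i).mp hi).2
    · intro hk
      exact List.mem_map.mpr ⟨(k : Int), (hSmem k).mpr ⟨by positivity, by simpa using hk⟩, by simp⟩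
  rw [hSshape, sum_shift_cast S (fun i hi => ((hSmem i).mp hi).1)]
  rw [sum_two_pow_of_testBit v (S.map Int.toNat) hTnd hTmem]
  rw [wAND_eq_cast w hne hnn, hv]

-- ---------- Part 5: windows and the loop bisimulation ----------

def win (arr : List Int) (l r : Int) : List Int :=
  (arr.drop l.toNat).take (r.toNat + 1 - l.toNat)

theorem pyGetD_idx (arr : List Int) (i : Int) (h0 : 0 ≤ i) :
    PySem.List.pyGetD arr i 0 = arr.getD i.toNat 0 := by
  conv_lhs => rw [← Int.toNat_of_nonneg h0]
  rw [PySem.List.pyGetD_natCast]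

theorem getD_nonneg (arr : List Int) (n : Nat) (hnn : ∀ x ∈ arr, 0 ≤ x) :
    0 ≤ arr.getD n 0 := by
  by_cases h : n < arr.length
  · rw [List.getD_eq_getElem _ _ h]
    exact hnn _ (List.getElem_mem _)
  · rw [List.getD_eq_default _ _ (by omega)]

theorem win_length (arr : List Int) (l r : Int) (h0 : 0 ≤ l) (h1 : l ≤ r + 1)
    (h2 : r < (arr.length : Int)) (h3 : 0 ≤ r) :
    ((win arr l r).length : Int) = r + 1 - l := by
  unfold win
  rw [List.length_take, List.length_drop]
  have hl := Int.toNat_of_nonneg h0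
  have hr := Int.toNat_of_nonneg h3
  have : r.toNat < arr.length := by omega
  have : l.toNat ≤ r.toNat + 1 := by omega
  rw [Nat.min_def]
  split_ifs with h <;> omega

theorem win_mem_nonneg (arr : List Int) (l r : Int) (hnn : ∀ x ∈ arr, 0 ≤ x) :
    ∀ y ∈ win arr l r, 0 ≤ y := by
  intro y hy
  exact hnn y (List.mem_of_mem_drop (List.mem_of_mem_take hy))

theorem win_append (arr : List Int) (l r : Int) (h0 : 0 ≤ l) (h1 : l ≤ r + 1)
    (h3 : 0 ≤ r) (h2 : r + 1 < (arr.length : Int)) :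
    win arr l (r + 1) = win arr l r ++ [arr.getD (r + 1).toNat 0] := by
  unfold win
  have hl := Int.toNat_of_nonneg h0
  have hr := Int.toNat_of_nonneg h3
  have hr1 : (r + 1).toNat = r.toNat + 1 := by omega
  have hlen : r.toNat + 1 < arr.length := by omega
  rw [hr1]
  have hidx : r.toNat + 1 - l.toNat < (arr.drop l.toNat).length := by
    rw [List.length_drop]; omega
  rw [(by omega : r.toNat + 1 + 1 - l.toNat = (r.toNat + 1 - l.toNat) + 1)]
  rw [List.take_add_one]
  congr 1
  rw [List.getElem?_drop]
  rw [(by omega : l.toNat + (r.toNat + 1 - l.toNat) = r.toNat + 1)]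
  rw [List.getElem?_eq_getElem hlen]
  rw [List.getD_eq_getElem _ _ hlen]
  rfl

theorem win_cons (arr : List Int) (l r : Int) (h0 : 0 ≤ l) (h1 : l ≤ r)
    (h2 : r < (arr.length : Int)) :
    win arr l r = arr.getD l.toNat 0 :: win arr (l + 1) r := by
  unfold win
  have hl := Int.toNat_of_nonneg h0
  have hr := Int.toNat_of_nonneg (le_trans h0 h1)
  have hlt : l.toNat < arr.length := by omega
  have hl1 : (l + 1).toNat = l.toNat + 1 := by omega
  rw [hl1]
  rw [List.drop_eq_getElem_cons hlt]
  rw [(by omega : r.toNat + 1 - l.toNat = (r.toNat + 1 - (l.toNat + 1)) + 1)]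
  rw [List.take_succ_cons]
  rw [List.getD_eq_getElem _ _ hlt]

theorem win_ne_nil (arr : List Int) (l r : Int) (h0 : 0 ≤ l) (h1 : l ≤ r)
    (h2 : r < (arr.length : Int)) : win arr l r ≠ [] := by
  intro h
  have := win_length arr l r h0 (by omega) h2 (le_trans h0 h1)
  rw [h] at this
  simp at this
  omega

-- B's direct recomputation: fold of band over range(l+1, r+1+1) starting at arr[l]
theorem foldB_range : ∀ (m : Nat) (arr : List Int) (a : Int) (init : Int), 0 ≤ a →
    a + m ≤ (arr.length : Int) →
    (PySem.List.pyRange a (a + m) 1).foldl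
        (fun c k => PySem.Int.band c (PySem.List.pyGetD arr k 0)) init =
      ((arr.drop a.toNat).take m).foldl PySem.Int.band init := by
  intro m
  induction m with
  | zero =>
    intro arr a init h0 hb
    rw [(by simp : a + ((0 : Nat) : Int) = a), PySem.List.pyRange_one_eq_nil (le_refl a)]
    simp
  | succ m ih =>
    intro arr a init h0 hb
    have htn := Int.toNat_of_nonneg h0
    push_cast at hb
    have ha : a.toNat < arr.length := by omega
    rw [PySem.List.pyRange_one_cons (by omega : a < a + (((m : Nat) + 1 : Nat) : Int))]
    rw [List.foldl_cons]
    have hstep : a + (((m + 1 : Nat)) : Int) = (a + 1) + ((m : Nat) : Int) := by push_cast; ring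
    rw [hstep]
    rw [ih arr (a + 1) _ (by omega) (by omega)]
    rw [List.drop_eq_getElem_cons ha, List.take_succ_cons, List.foldl_cons]
    rw [pyGetD_idx arr a h0, List.getD_eq_getElem _ _ ha]
    have : (a + 1).toNat = a.toNat + 1 := by omega
    rw [this]

theorem foldB (arr : List Int) (l r : Int) (h0 : 0 ≤ l) (h1 : l ≤ r)
    (h2 : r < (arr.length : Int)) :
    (PySem.List.pyRange (l + 1) (r + 1) 1).foldl
        (fun c k => PySem.Int.band c (PySem.List.pyGetD arr k 0))
        (PySem.List.pyGetD arr l 0) = wAND (win arr l r) := by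
  have hl := Int.toNat_of_nonneg h0
  have hr := Int.toNat_of_nonneg (le_trans h0 h1)
  have hlt : l.toNat < arr.length := by omega
  have hm : r + 1 = (l + 1) + (((r - l).toNat : Nat) : Int) := by
    rw [Int.toNat_of_nonneg (by omega : (0:Int) ≤ r - l)]; ring
  rw [hm, foldB_range ((r - l).toNat) arr (l + 1) _ (by omega) (by rw [← hm]; omega)]
  rw [win_cons arr l r h0 h1 h2]
  unfold wAND
  simp only [List.tail_cons, List.headD_cons]
  rw [pyGetD_idx arr l h0]
  unfold win
  have e1 : (l + 1).toNat = l.toNat + 1 := by omega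
  have e2 : r.toNat + 1 - (l.toNat + 1) = (r - l).toNat := by omega
  rw [e1, e2]

-- the two loops agree
theorem bisim : ∀ (fuel : Nat) (arr : List Int) (target l r : Int)
    (bc : PySem.Dict Int Int) (curA curB best : Int),
    (∀ x ∈ arr, 0 ≤ x) → 0 ≤ l → l ≤ r + 1 → 0 ≤ r →
    CntOK (win arr l r) bc → (l ≤ r → curA = curB) →
    loopA arr target fuel l r bc curA best = loopB arr target fuel l r curB best := by
  intro fuel
  induction fuel with
  | zero => intro arr target l r bc curA curB best _ _ _ _ _ _; rfl
  | succ fuel ih =>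
    intro arr target l r bc curA curB best hnn h0 h1 h3 hcnt hcur
    simp only [loopA, loopB]
    by_cases hr : r < (arr.length : Int)
    · rw [if_pos hr, if_pos hr]
      have hcond : (curA > target ∨ l > r) ↔ (curB > target ∨ l > r) := by
        by_cases hlr : l ≤ r
        · rw [hcur hlr]
        · constructor <;> intro _ <;> exact Or.inr (by omega)
      by_cases hc : curA > target ∨ l > r
      · rw [if_pos hc, if_pos (hcond.mp hc)]
        by_cases hnb : r + 1 ≥ (arr.length : Int)
        · rw [if_pos hnb, if_pos hnb]
        · rw [if_neg hnb, if_neg hnb]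
          push Not at hnb
          have hx0 : (0 : Int) ≤ PySem.List.pyGetD arr (r + 1) 0 := by
            rw [pyGetD_idx arr (r + 1) (by omega)]
            exact getD_nonneg arr _ hnn
          have hwin : win arr l (r + 1) = win arr l r ++ [PySem.List.pyGetD arr (r + 1) 0] := by
            rw [win_append arr l r h0 h1 h3 hnb]
            congr 1
            rw [pyGetD_idx arr (r + 1) (by omega)]
          have hcnt' : CntOK (win arr l (r + 1))
              (counterIAdd bc (PySem.Dict.counter (gsbp (PySem.List.pyGetD arr (r + 1) 0)))) := by
            rw [hwin]
            exact CntOK_add _ bc _ hx0 hcnt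
          have hlen : ((win arr l (r + 1)).length : Int) = r + 1 + 1 - l :=
            win_length arr l (r + 1) h0 (by omega) (by omega) (by omega)
          have hcalc : calcAND (r + 1 - l + 1)
              (counterIAdd bc (PySem.Dict.counter (gsbp (PySem.List.pyGetD arr (r + 1) 0)))) =
              wAND (win arr l (r + 1)) := by
            rw [(by omega : r + 1 - l + 1 = r + 1 + 1 - l), ← hlen]
            exact calc_eq _ _ hcnt' (win_ne_nil arr l (r + 1) h0 (by omega) (by omega))
              (win_mem_nonneg arr l (r + 1) hnn)
          rw [if_pos h1]
          rw [if_pos (by omega : l ≤ r + 1)]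
          have hb2 : r + 2 = r + 1 + 1 := by ring
          rw [hb2, foldB arr l (r + 1) h0 (by omega) (by omega)]
          rw [hcalc]
          exact ih arr target l (r + 1) _ _ _ _ hnn h0 (by omega) (by omega) hcnt'
            (fun _ => rfl)
      · rw [if_neg hc, if_neg (fun h => hc (hcond.mpr h))]
        push Not at hc
        have hlr : l ≤ r := by omega
        have hxl : (0 : Int) ≤ PySem.List.pyGetD arr l 0 := by
          rw [pyGetD_idx arr l h0]
          exact getD_nonneg arr _ hnn
        have hwin : win arr l r = PySem.List.pyGetD arr l 0 :: win arr (l + 1) r := by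
          rw [win_cons arr l r h0 hlr hr]
          congr 1
          rw [pyGetD_idx arr l h0]
        have hcnt' : CntOK (win arr (l + 1) r)
            (counterISub bc (PySem.Dict.counter (gsbp (PySem.List.pyGetD arr l 0)))) := by
          apply CntOK_sub _ bc _ hxl
          rw [← hwin]
          exact hcnt
        by_cases hls : l + 1 ≤ r
        · rw [if_pos hls, if_pos hls]
          have hlen : ((win arr (l + 1) r).length : Int) = r + 1 - (l + 1) :=
            win_length arr (l + 1) r (by omega) (by omega) hr h3
          have hcalc : calcAND (r - (l + 1) + 1)
              (counterISub bc (PySem.Dict.counter (gsbp (PySem.List.pyGetD arr l 0)))) =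
              wAND (win arr (l + 1) r) := by
            rw [(by omega : r - (l + 1) + 1 = r + 1 - (l + 1)), ← hlen]
            exact calc_eq _ _ hcnt' (win_ne_nil arr (l + 1) r (by omega) hls hr)
              (win_mem_nonneg arr (l + 1) r hnn)
          have hb2 : l + 2 = l + 1 + 1 := by ring
          rw [hb2, foldB arr (l + 1) r (by omega) hls hr]
          rw [hcalc]
          exact ih arr target (l + 1) r _ _ _ _ hnn (by omega) (by omega) h3 hcnt'
            (fun _ => rfl)
        · rw [if_neg hls, if_neg hls]
          exact ih arr target (l + 1) r _ _ _ _ hnn (by omega) (by omega) h3 hcnt'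
            (fun h => absurd h hls)
    · rw [if_neg hr, if_neg hr]

-- ===== VERDICT (by name: the statement is the Claim_ definition above) =====
theorem closestToTarget_spec : Claim_equal_closestToTarget := by
  intro arr target _ hpre
  obtain ⟨hne, hnn⟩ := hpre
  unfold Spec_closestToTarget closestToTarget closestToTarget_alt
  rcases arr with - | ⟨h, t⟩
  · exact absurd rfl hne
  · have hget : PySem.List.pyGetD (h :: t) 0 0 = h := PySem.List.pyGetD_zero_cons h t 0
    have hwin : win (h :: t) 0 0 = [h] := rfl
    apply bisim ((2 * (h :: t).length + 2)) (h :: t) target 0 0 _ _ _ _ hnn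
      (le_refl 0) (by omega) (le_refl 0)
    · rw [hget, hwin]
      exact counter_gsbp_CntOK h (hnn h (List.mem_cons_self ..))
    · intro _; rfl
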